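-- pv_equiv track=rewrite | github.com/danielpodrazka/dagster-document-intelligence | scripts/minify_instructions.py | collapse_multiline_ifs
-- ===== SOURCE A (Python) =====
-- def collapse_multiline_ifs(text: str) -> str:
--     """Collapse multi-line if conditions onto fewer lines inside code blocks.
--
--     Turns:
--         if (
--             data.x is not None
--             and data.y is not None
--         ):
--     Into:
--         if (data.x is not None and data.y is not None):
--     """
--     in_code_block = False
--     result_lines: list[str] = []
--     i = 0
--     lines = text.splitlines(keepends=True)
--
--     while i < len(lines):
--         line = lines[i]
--         stripped = line.strip()
--
--         if stripped.startswith("```"):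
--             in_code_block = not in_code_block
--             result_lines.append(line)
--             i += 1
--             continue
--
--         if in_code_block and stripped in ("if (", "elif ("):
--             # Collect continuation lines until we hit "):"
--             indent = len(line) - len(line.lstrip())
--             keyword = stripped.rstrip(" (")
--             condition_parts: list[str] = []
--             i += 1
--             while i < len(lines):
--                 cline = lines[i].strip()
--                 if cline == "):":
--                     break
--                 condition_parts.append(cline)
--                 i += 1
--             joined = " ".join(condition_parts)
--             result_lines.append(" " * indent + f"{keyword} ({joined}):\n")
--             i += 1
--             continue
--
--         result_lines.append(line)
--         i += 1
--
--     return "".join(result_lines)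
-- ===== SOURCE B (Python) =====
-- def collapse_multiline_ifs(text: str) -> str:
--     """Collapse multi-line if conditions onto fewer lines inside code blocks.
--
--     Single flat state-machine pass: no index arithmetic, no inner while loop.
--     """
--     out: list[str] = []
--     in_code_block = False
--     collecting = None  # None, or (indent, keyword, condition_parts)
--     for line in text.splitlines(keepends=True):
--         stripped = line.strip()
--         if collecting is not None:
--             indent, keyword, parts = collecting
--             if stripped == "):":
--                 out.append(" " * indent + keyword + " (" + " ".join(parts) + "):\n")
--                 collecting = None
--             else:
--                 parts.append(stripped)
--         elif stripped.startswith("```"):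
--             in_code_block = not in_code_block
--             out.append(line)
--         elif in_code_block and stripped in ("if (", "elif ("):
--             collecting = (len(line) - len(line.lstrip()), stripped.rstrip(" ("), [])
--         else:
--             out.append(line)
--     if collecting is not None:
--         indent, keyword, parts = collecting
--         out.append(" " * indent + keyword + " (" + " ".join(parts) + "):\n")
--     return "".join(out)
-- ===== Notes on version B (the rewrite author's own statement) =====
-- stated objective: alternative
-- what changed: Replaces A's index-driven while loop with a consume-ahead inner while by a single flat pass over the lines that carries an optional collecting-state triple (indent, keyword, parts) and flushes any pending collection after the loop.
import Mathlib
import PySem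

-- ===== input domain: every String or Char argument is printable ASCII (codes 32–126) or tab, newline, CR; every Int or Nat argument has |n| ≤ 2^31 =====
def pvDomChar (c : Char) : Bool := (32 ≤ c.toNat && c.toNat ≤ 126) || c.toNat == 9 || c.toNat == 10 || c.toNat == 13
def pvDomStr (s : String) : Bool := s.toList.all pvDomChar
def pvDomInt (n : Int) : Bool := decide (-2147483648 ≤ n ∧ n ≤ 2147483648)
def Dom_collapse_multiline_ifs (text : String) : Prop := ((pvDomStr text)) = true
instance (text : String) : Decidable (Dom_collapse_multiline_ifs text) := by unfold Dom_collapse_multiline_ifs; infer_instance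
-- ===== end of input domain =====

-- B is the same task as a single flat loop with an explicit collecting state instead of A's
-- index-based while loop with a consume-ahead inner while; same cost, no speed claim.

-- Shared builtin helpers (both Pythons call the same built-ins):
-- str.splitlines(keepends=True) — exact on the Dom alphabet (line breaks there are '\n', '\r', '\r\n')
def pvSplitlinesKeep (cs : List Char) (cur : List Char) : List (List Char) :=
  match cs with
  | [] => if cur.isEmpty then [] else [cur]
  | '\r' :: '\n' :: rest => (cur ++ ['\r', '\n']) :: pvSplitlinesKeep rest []
  | '\r' :: rest => (cur ++ ['\r']) :: pvSplitlinesKeep rest []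
  | '\n' :: rest => (cur ++ ['\n']) :: pvSplitlinesKeep rest []
  | c :: rest => pvSplitlinesKeep rest (cur ++ [c])

-- str.rstrip(chars) — exact: drop trailing characters that occur in chars
def pvRstripChars (cs : List Char) (chars : List Char) : List Char :=
  (cs.reverse.dropWhile (fun c => chars.contains c)).reverse

-- ===== PORT A =====
-- A's inner while: collect stripped lines until one strips to "):", return (parts, remaining lines)
def pvCollectA (ls : List (List Char)) : List (List Char) × List (List Char) :=
  match ls with
  | [] => ([], [])
  | l :: rest =>
      let cline := PySem.Chars.strip l
      if cline = "):".toList then ([], rest)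
      else
        let pr := pvCollectA rest
        (cline :: pr.1, pr.2)

-- termination lemma for pvLoopA (cited by name in decreasing_by)
theorem pvCollectA_snd_length_le (ls : List (List Char)) : (pvCollectA ls).2.length ≤ ls.length := by
  induction ls with
  | nil => simp [pvCollectA]
  | cons l rest ih =>
      simp only [pvCollectA]
      split
      · simp
      · simpa using Nat.le_succ_of_le ih

def pvLoopA (lines : List (List Char)) (inCode : Bool) : List (List Char) :=
  match lines with
  | [] => []
  | line :: rest =>
      let stripped := PySem.Chars.strip line
      if PySem.Chars.startswith stripped ("```".toList) then
        line :: pvLoopA rest (!inCode)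
      else if inCode ∧ (stripped = "if (".toList ∨ stripped = "elif (".toList) then
        let indent := line.length - (PySem.Chars.lstrip line).length
        let keyword := pvRstripChars stripped [' ', '(']
        let pr := pvCollectA rest
        let joined := PySem.Chars.join [' '] pr.1
        (List.replicate indent ' ' ++ keyword ++ " (".toList ++ joined ++ "):\n".toList)
          :: pvLoopA pr.2 inCode
      else
        line :: pvLoopA rest inCode
termination_by lines.length
decreasing_by
  · simp
  · have := pvCollectA_snd_length_le rest; simp; omega
  · simp

def collapse_multiline_ifs (text : String) : String :=
  String.ofList (PySem.Chars.join [] (pvLoopA (pvSplitlinesKeep text.toList []) false))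

-- ===== PORT B =====
def pvEmitB (ind : Nat) (kw : List Char) (parts : List (List Char)) : List Char :=
  List.replicate ind ' ' ++ kw ++ " (".toList ++ PySem.Chars.join [' '] parts ++ "):\n".toList

def pvLoopB (lines : List (List Char)) (inCode : Bool)
    (col : Option (Nat × List Char × List (List Char))) (acc : List (List Char)) :
    List (List Char) :=
  match lines with
  | [] =>
      match col with
      | none => acc.reverse
      | some (ind, kw, ps) => (pvEmitB ind kw ps :: acc).reverse
  | line :: rest =>
      let s := PySem.Chars.strip line
      match col with
      | some (ind, kw, ps) =>
          if s = "):".toList then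
            pvLoopB rest inCode none (pvEmitB ind kw ps :: acc)
          else
            pvLoopB rest inCode (some (ind, kw, ps ++ [s])) acc
      | none =>
          if PySem.Chars.startswith s ("```".toList) then
            pvLoopB rest (!inCode) none (line :: acc)
          else if inCode ∧ (s = "if (".toList ∨ s = "elif (".toList) then
            pvLoopB rest inCode
              (some (line.length - (PySem.Chars.lstrip line).length,
                     pvRstripChars s [' ', '('], [])) acc
          else
            pvLoopB rest inCode none (line :: acc)

def collapse_multiline_ifs_alt (text : String) : String :=
  String.ofList (PySem.Chars.join [] (pvLoopB (pvSplitlinesKeep text.toList []) false none []))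

-- ===== PRECONDITION & SPEC =====
def Spec_collapse_multiline_ifs (text : String) (out : String) : Prop := out = collapse_multiline_ifs_alt text
instance (text : String) (out : String) : Decidable (Spec_collapse_multiline_ifs text out) := by unfold Spec_collapse_multiline_ifs; infer_instance

-- ===== CLAIM (what is proved, stated in full; the proofs are below) =====
def Claim_equal_collapse_multiline_ifs : Prop := ∀ (text : String), Dom_collapse_multiline_ifs text → Spec_collapse_multiline_ifs text (collapse_multiline_ifs text)

-- ===== LEMMAS AND PROOFS =====

-- The invariant pair: B with no collecting state computes A; B while collecting computes
-- A's inner while (pvCollectA) followed by the emitted collapsed line.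
theorem pvLoopB_eq_pvLoopA :
    ∀ (n : Nat) (lines : List (List Char)), lines.length ≤ n →
      (∀ (inCode : Bool) (acc : List (List Char)),
        pvLoopB lines inCode none acc = acc.reverse ++ pvLoopA lines inCode) ∧
      (∀ (inCode : Bool) (ind : Nat) (kw : List Char) (ps acc : List (List Char)),
        pvLoopB lines inCode (some (ind, kw, ps)) acc =
          acc.reverse ++
            (pvEmitB ind kw (ps ++ (pvCollectA lines).1) :: pvLoopA (pvCollectA lines).2 inCode)) := by
  intro n
  induction n with
  | zero =>
      intro lines hlen
      have : lines = [] := List.length_eq_zero_iff.mp (Nat.le_zero.mp hlen)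
      subst this
      constructor
      · intro inCode acc; simp [pvLoopB, pvLoopA]
      · intro inCode ind kw ps acc; simp [pvLoopB, pvLoopA, pvCollectA]
  | succ n ih =>
      intro lines hlen
      match lines with
      | [] =>
          constructor
          · intro inCode acc; simp [pvLoopB, pvLoopA]
          · intro inCode ind kw ps acc; simp [pvLoopB, pvLoopA, pvCollectA]
      | line :: rest =>
          have hrest : rest.length ≤ n := by simpa using Nat.lt_succ_iff.mp (by simpa using hlen)
          constructor
          · intro inCode acc
            rw [pvLoopB, pvLoopA]
            split_ifs with h1 h2
            · rw [(ih rest hrest).1]; simp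
            · rw [(ih rest hrest).2]; simp [pvEmitB]
            · rw [(ih rest hrest).1]; simp
          · intro inCode ind kw ps acc
            rw [pvLoopB]
            split_ifs with h1
            · rw [(ih rest hrest).1]
              simp only [pvCollectA]
              rw [if_pos h1]
              simp
            · rw [(ih rest hrest).2]
              simp only [pvCollectA]
              rw [if_neg h1]
              simp

-- ===== VERDICT (by name: the statement is the Claim_ definition above) =====
theorem collapse_multiline_ifs_spec : Claim_equal_collapse_multiline_ifs := by
  intro text _
  unfold Spec_collapse_multiline_ifs collapse_multiline_ifs collapse_multiline_ifs_alt
  rw [(pvLoopB_eq_pvLoopA (pvSplitlinesKeep text.toList []).length _ le_rfl).1]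
  simp
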